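-- pv_equiv track=rewrite | github.com/jdfesa/TP4-Programacion2 | tp4-ej11.py | validar_numeros_antes_despues_vocal
-- ===== SOURCE A (Python) =====
-- def validar_numeros_antes_despues_vocal(contrasena: str) -> bool:
--     vocales = "aeiouAEIOU"
--     for i in range(len(contrasena) - 1):
--         actual = contrasena[i]
--         siguiente = contrasena[i + 1]
--
--         #Vocal seguida de número
--         if actual in vocales and siguiente.isdigit():
--             return False
--
--         #Número seguido de vocal
--         if actual.isdigit() and siguiente in vocales:
--             return False
--     return True
-- ===== SOURCE B (Python) =====
-- def validar_numeros_antes_despues_vocal(contrasena: str) -> bool: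
--     # Pattern-search formulation: the password is invalid exactly when some
--     # two-character pattern vowel+digit or digit+vowel occurs as a substring.
--     for v in "aeiouAEIOU":
--         for d in "0123456789":
--             if v + d in contrasena or d + v in contrasena:
--                 return False
--     return True
-- ===== Notes on version B (the rewrite author's own statement) =====
-- stated objective: alternative
-- what changed: B replaces the adjacent-pair index scan by a substring-search formulation: it enumerates the 200 two-character forbidden patterns vowel+digit / digit+vowel and returns False iff any occurs as a substring of the password.
import Mathlib
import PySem

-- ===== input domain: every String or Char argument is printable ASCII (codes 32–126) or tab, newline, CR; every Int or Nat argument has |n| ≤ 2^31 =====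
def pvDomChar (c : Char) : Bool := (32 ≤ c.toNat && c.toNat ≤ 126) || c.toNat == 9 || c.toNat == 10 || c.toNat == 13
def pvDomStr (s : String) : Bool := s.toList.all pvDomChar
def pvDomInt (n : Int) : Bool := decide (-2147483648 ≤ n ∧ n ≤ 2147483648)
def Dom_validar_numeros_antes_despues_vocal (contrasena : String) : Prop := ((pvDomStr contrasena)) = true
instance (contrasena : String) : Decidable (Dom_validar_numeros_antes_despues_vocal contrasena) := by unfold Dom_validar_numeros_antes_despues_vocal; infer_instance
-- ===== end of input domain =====

-- B replaces A's adjacent-pair scan by a search for the 200 two-character forbidden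
-- substrings vowel+digit / digit+vowel. Objective: alternative algorithm.

-- ===== PORT A =====
-- `c in vocales` for a single char = membership in the vowel characters
def pvVocal (c : Char) : Bool := c ∈ "aeiouAEIOU".toList

-- the `for i in range(len-1)` loop over adjacent characters, with early return False
def pvLoopA : List Char → Bool
  | actual :: siguiente :: rest =>
      if pvVocal actual && PySem.Chars.isdigit siguiente then false
      else if PySem.Chars.isdigit actual && pvVocal siguiente then false
      else pvLoopA (siguiente :: rest)
  | _ => true

def validar_numeros_antes_despues_vocal (contrasena : String) : Bool :=
  pvLoopA contrasena.toList

-- ===== PORT B =====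
-- inner `for d in "0123456789"`: true iff some pattern v+d or d+v occurs in s
def pvInnerB (v : Char) (s : List Char) : List Char → Bool
  | [] => false
  | d :: ds =>
      if PySem.Chars.isIn [v, d] s || PySem.Chars.isIn [d, v] s then true
      else pvInnerB v s ds

-- outer `for v in "aeiouAEIOU"`: early return False when the inner loop finds a pattern
def pvOuterB (s : List Char) : List Char → Bool
  | [] => true
  | v :: vs => if pvInnerB v s "0123456789".toList then false else pvOuterB s vs

def validar_numeros_antes_despues_vocal_alt (contrasena : String) : Bool :=
  pvOuterB contrasena.toList "aeiouAEIOU".toList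

-- ===== PRECONDITION & SPEC =====
def Spec_validar_numeros_antes_despues_vocal (contrasena : String) (out : Bool) : Prop := out = validar_numeros_antes_despues_vocal_alt contrasena
instance (contrasena : String) (out : Bool) : Decidable (Spec_validar_numeros_antes_despues_vocal contrasena out) := by unfold Spec_validar_numeros_antes_despues_vocal; infer_instance

-- ===== CLAIM (what is proved, stated in full; the proofs are below) =====
def Claim_equal_validar_numeros_antes_despues_vocal : Prop := ∀ (contrasena : String), Dom_validar_numeros_antes_despues_vocal contrasena → Spec_validar_numeros_antes_despues_vocal contrasena (validar_numeros_antes_despues_vocal contrasena)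

-- ===== LEMMAS AND PROOFS =====
def pvBad (a b : Char) : Bool :=
  (pvVocal a && PySem.Chars.isdigit b) || (PySem.Chars.isdigit a && pvVocal b)

theorem pvLoopA_true_iff (cs : List Char) :
    pvLoopA cs = true ↔ ∀ p ∈ cs.zip cs.tail, pvBad p.1 p.2 = false := by
  induction cs with
  | nil => simp [pvLoopA]
  | cons a cs ih =>
      cases cs with
      | nil => simp [pvLoopA]
      | cons b rest =>
          have hstep : pvLoopA (a :: b :: rest) =
              if pvVocal a && PySem.Chars.isdigit b then false
              else if PySem.Chars.isdigit a && pvVocal b then false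
              else pvLoopA (b :: rest) := rfl
          rw [hstep]
          simp only [List.zip_cons_cons, List.tail_cons, List.forall_mem_cons]
          by_cases h : pvBad a b = true
          · simp only [pvBad, Bool.or_eq_true] at h
            rcases h with h | h <;> simp [pvBad, h]
          · simp only [Bool.not_eq_true, pvBad, Bool.or_eq_false_iff] at h
            rw [if_neg (by simp [h.1]), if_neg (by simp [h.2]), ih]
            simp [pvBad, h.1, h.2]

theorem pvPair_mem_iff_infix (a b : Char) (cs : List Char) :
    (a, b) ∈ cs.zip cs.tail ↔ [a, b] <:+: cs := by
  induction cs with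
  | nil => simp
  | cons c cs ih =>
      cases cs with
      | nil =>
          constructor
          · intro h; simp at h
          · intro h; have := h.length_le; simp at this
      | cons d t =>
          simp only [List.tail_cons, List.zip_cons_cons, List.mem_cons, Prod.mk.injEq]
          rw [List.infix_cons_iff]
          constructor
          · rintro (⟨rfl, rfl⟩ | h')
            · exact Or.inl ⟨t, rfl⟩
            · exact Or.inr (ih.1 (by simpa using h'))
          · rintro (hpre | hinf)
            · obtain ⟨u, hu⟩ := hpre
              injection hu with h1 h2; injection h2 with h3 _
              exact Or.inl ⟨h1, h3⟩
            · exact Or.inr (by simpa using ih.2 hinf)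

theorem pvInnerB_true_iff (v : Char) (s ds : List Char) :
    pvInnerB v s ds = true ↔
      ∃ d ∈ ds, PySem.Chars.isIn [v, d] s = true ∨ PySem.Chars.isIn [d, v] s = true := by
  induction ds with
  | nil => simp [pvInnerB]
  | cons d ds ih =>
      have hstep : pvInnerB v s (d :: ds) =
          if PySem.Chars.isIn [v, d] s || PySem.Chars.isIn [d, v] s then true
          else pvInnerB v s ds := rfl
      rw [hstep]
      by_cases h : (PySem.Chars.isIn [v, d] s || PySem.Chars.isIn [d, v] s) = true
      · rw [if_pos h]
        simp only [true_iff]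
        exact ⟨d, List.mem_cons_self .., by simpa using h⟩
      · rw [if_neg h, ih]
        simp only [Bool.or_eq_true, not_or, Bool.not_eq_true] at h
        constructor
        · rintro ⟨x, hx, hor⟩
          exact ⟨x, List.mem_cons_of_mem _ hx, hor⟩
        · rintro ⟨x, hx, hor⟩
          rcases List.mem_cons.1 hx with rfl | hx'
          · rcases hor with hor | hor
            · exact absurd hor (by simp [h.1])
            · exact absurd hor (by simp [h.2])
          · exact ⟨x, hx', hor⟩

theorem pvOuterB_true_iff (s vs : List Char) :
    pvOuterB s vs = true ↔ ∀ v ∈ vs, pvInnerB v s "0123456789".toList = false := by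
  induction vs with
  | nil => simp [pvOuterB]
  | cons v vs ih =>
      have hstep : pvOuterB s (v :: vs) =
          if pvInnerB v s "0123456789".toList then false else pvOuterB s vs := rfl
      rw [hstep, List.forall_mem_cons]
      by_cases h : pvInnerB v s "0123456789".toList = true
      · rw [if_pos h]
        constructor
        · intro hf; exact absurd hf (by simp)
        · intro hall; rw [hall.1] at h; exact absurd h (by simp)
      · rw [if_neg h, ih]
        have h' : pvInnerB v s "0123456789".toList = false := by simpa using h
        exact ⟨fun hall => ⟨h', hall⟩, fun hall => hall.2⟩

-- isdigit agrees with membership in "0123456789" on the ASCII range (Dom characters)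
set_option maxRecDepth 8192 in
theorem pvIsdigit_ascii (c : Char) (h : c.toNat < 128) :
    PySem.Chars.isdigit c = true ↔ c ∈ "0123456789".toList := by
  have htab : ∀ n ∈ List.range 128,
      (PySem.Chars.isdigit (Char.ofNat n) = true ↔ Char.ofNat n ∈ "0123456789".toList) := by
    decide
  have hc : Char.ofNat c.toNat = c := Char.ofNat_toNat c
  have := htab c.toNat (List.mem_range.2 h)
  rwa [hc] at this

theorem pvCharLt128 (c : Char) (h : pvDomChar c = true) : c.toNat < 128 := by
  simp only [pvDomChar, Bool.or_eq_true, Bool.and_eq_true, decide_eq_true_eq, beq_iff_eq] at h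
  omega

set_option maxRecDepth 8192 in
theorem pvMain (cs : List Char) (hdom : ∀ c ∈ cs, pvDomChar c = true) :
    pvLoopA cs = pvOuterB cs "aeiouAEIOU".toList := by
  rw [Bool.eq_iff_iff, pvLoopA_true_iff, pvOuterB_true_iff]
  constructor
  · -- no bad adjacent pair → no pattern occurs
    intro hall v hv
    rw [← Bool.not_eq_true, pvInnerB_true_iff]
    rintro ⟨d, hd, hor⟩
    have hvv : pvVocal v = true := by
      unfold pvVocal; exact decide_eq_true hv
    have hdd : PySem.Chars.isdigit d = true := by
      have hd' : d = '0' ∨ d = '1' ∨ d = '2' ∨ d = '3' ∨ d = '4' ∨ d = '5' ∨ d = '6' ∨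
          d = '7' ∨ d = '8' ∨ d = '9' := by simpa using hd
      rcases hd' with rfl|rfl|rfl|rfl|rfl|rfl|rfl|rfl|rfl|rfl <;> decide
    rcases hor with hin | hin
    · have hmem := (pvPair_mem_iff_infix v d cs).2 ((PySem.Chars.isIn_iff_infix _ _).1 hin)
      have := hall (v, d) hmem
      simp [pvBad, hvv, hdd] at this
    · have hmem := (pvPair_mem_iff_infix d v cs).2 ((PySem.Chars.isIn_iff_infix _ _).1 hin)
      have := hall (d, v) hmem
      simp [pvBad, hvv, hdd] at this
  · -- no pattern occurs → no bad adjacent pair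
    intro hall p hp
    obtain ⟨a, b⟩ := p
    rw [← Bool.not_eq_true]
    intro hbad
    have hmema : a ∈ cs := (List.of_mem_zip hp).1
    have hmemb : b ∈ cs := List.mem_of_mem_tail (List.of_mem_zip hp).2
    simp only [pvBad, Bool.or_eq_true, Bool.and_eq_true] at hbad
    rcases hbad with ⟨hva, hdb⟩ | ⟨hda, hvb⟩
    · have hbdig : b ∈ "0123456789".toList :=
        (pvIsdigit_ascii b (pvCharLt128 b (hdom b hmemb))).1 hdb
      have havoc : a ∈ "aeiouAEIOU".toList := by simpa [pvVocal] using hva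
      have := hall a havoc
      rw [← Bool.not_eq_true, pvInnerB_true_iff] at this
      exact this ⟨b, hbdig, Or.inl ((PySem.Chars.isIn_iff_infix _ _).2
        ((pvPair_mem_iff_infix a b cs).1 hp))⟩
    · have hadig : a ∈ "0123456789".toList :=
        (pvIsdigit_ascii a (pvCharLt128 a (hdom a hmema))).1 hda
      have hbvoc : b ∈ "aeiouAEIOU".toList := by simpa [pvVocal] using hvb
      have := hall b hbvoc
      rw [← Bool.not_eq_true, pvInnerB_true_iff] at this
      exact this ⟨a, hadig, Or.inr ((PySem.Chars.isIn_iff_infix _ _).2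
        ((pvPair_mem_iff_infix a b cs).1 hp))⟩

-- ===== VERDICT (by name: the statement is the Claim_ definition above) =====
theorem validar_numeros_antes_despues_vocal_spec : Claim_equal_validar_numeros_antes_despues_vocal := by
  intro s hdom
  unfold Spec_validar_numeros_antes_despues_vocal validar_numeros_antes_despues_vocal validar_numeros_antes_despues_vocal_alt
  exact pvMain s.toList (by simpa [Dom_validar_numeros_antes_despues_vocal, pvDomStr, List.all_eq_true] using hdom)
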